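-- pv_equiv track=rewrite | github.com/brandonr49/board_game_engine | server/dvonn/state.py | is_straight_line
-- ===== SOURCE A (Python) =====
-- ROW_INDENT = [2, 1, 0, 1, 2]
--
-- def _to_cube(row, col):
--     """Convert offset (row, col) to cube coordinates (q, r)."""
--     q = (ROW_INDENT[row] + col * 2 - row) // 2
--     r = row
--     return q, r
--
-- _CUBE_DIRS = [(1, 0), (-1, 0), (0, 1), (0, -1), (1, -1), (-1, 1)]
--
-- def is_straight_line(from_row, from_col, to_row, to_col, distance):
--     """Check if (from) to (to) is a straight cube-coordinate line of given distance."""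
--     fq, fr = _to_cube(from_row, from_col)
--     tq, tr = _to_cube(to_row, to_col)
--     dq, dr = tq - fq, tr - fr
--
--     for dirq, dirr in _CUBE_DIRS:
--         if dq == dirq * distance and dr == dirr * distance:
--             return True
--     return False
-- ===== SOURCE B (Python) =====
-- ROW_INDENT = [2, 1, 0, 1, 2]
--
-- def _to_cube(row, col):
--     """Convert offset (row, col) to cube coordinates (q, r)."""
--     q = (ROW_INDENT[row] + col * 2 - row) // 2
--     r = row
--     return q, r
--
-- def is_straight_line(from_row, from_col, to_row, to_col, distance):
--     """Closed-form cube test: a delta is a straight line of length |distance|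
--     iff one cube coordinate delta is zero and the largest |delta| is |distance|."""
--     fq, fr = _to_cube(from_row, from_col)
--     tq, tr = _to_cube(to_row, to_col)
--     dq, dr = tq - fq, tr - fr
--     ds = -dq - dr
--     return 0 in (dq, dr, ds) and max(abs(dq), abs(dr), abs(ds)) == abs(distance)
-- ===== Notes on version B (the rewrite author's own statement) =====
-- stated objective: alternative
-- what changed: Replaces the scan over the six cube direction vectors with a closed-form arithmetic test: one of the three cube-coordinate deltas (dq, dr, ds=-dq-dr) is zero and their largest absolute value equals |distance|.
import Mathlib
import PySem

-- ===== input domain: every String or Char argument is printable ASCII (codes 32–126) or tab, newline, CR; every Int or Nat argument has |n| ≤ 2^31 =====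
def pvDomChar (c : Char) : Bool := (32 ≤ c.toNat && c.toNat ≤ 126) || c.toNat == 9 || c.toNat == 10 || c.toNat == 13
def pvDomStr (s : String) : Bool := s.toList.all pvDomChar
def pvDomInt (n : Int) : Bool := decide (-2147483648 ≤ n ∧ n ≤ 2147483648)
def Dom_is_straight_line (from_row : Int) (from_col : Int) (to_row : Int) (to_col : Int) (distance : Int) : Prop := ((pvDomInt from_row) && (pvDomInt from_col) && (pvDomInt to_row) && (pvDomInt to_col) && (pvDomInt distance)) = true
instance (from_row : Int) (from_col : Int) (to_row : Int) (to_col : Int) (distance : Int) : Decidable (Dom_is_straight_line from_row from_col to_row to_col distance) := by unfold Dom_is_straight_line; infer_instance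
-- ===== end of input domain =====

-- ===== PORT A =====
-- B changes the six-direction scan into a closed-form arithmetic test on the cube deltas (alternative decomposition, same cost).
-- A and B raise IndexError when a row index is outside [-5, 4] (Python list indexing, negative wrap); Pre_ excludes exactly those.

def rowIndent : List Int := [2, 1, 0, 1, 2]

-- _to_cube: returns none exactly where Python's ROW_INDENT[row] raises IndexError
def toCube? (row : Int) (col : Int) : Option (Int × Int) :=
  match PySem.List.pyGet? rowIndent row with
  | none => none
  | some ind => some (PySem.Int.floordiv (ind + col * 2 - row) 2, row)

def cubeDirs : List (Int × Int) := [(1, 0), (-1, 0), (0, 1), (0, -1), (1, -1), (-1, 1)]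

-- the for-loop over _CUBE_DIRS with early return
def dirLoop : List (Int × Int) → Int → Int → Int → Bool
  | [], _, _, _ => false
  | (dirq, dirr) :: rest, dq, dr, distance =>
      if dq = dirq * distance ∧ dr = dirr * distance then true
      else dirLoop rest dq dr distance

def is_straight_line (from_row : Int) (from_col : Int) (to_row : Int) (to_col : Int) (distance : Int) : Bool :=
  match toCube? from_row from_col, toCube? to_row to_col with
  | some (fq, fr), some (tq, tr) => dirLoop cubeDirs (tq - fq) (tr - fr) distance
  | _, _ => false   -- unreachable under Pre_ (Python raises here)

-- ===== PORT B =====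
def rowIndentB : List Int := [2, 1, 0, 1, 2]

def toCubeB? (row : Int) (col : Int) : Option (Int × Int) :=
  (PySem.List.pyGet? rowIndentB row).map
    (fun ind => (PySem.Int.floordiv (ind + col * 2 - row) 2, row))

def is_straight_line_alt (from_row : Int) (from_col : Int) (to_row : Int) (to_col : Int) (distance : Int) : Bool :=
  match toCubeB? from_row from_col with
  | none => false   -- unreachable under Pre_ (Python raises here)
  | some (fq, fr) =>
    match toCubeB? to_row to_col with
    | none => false   -- unreachable under Pre_ (Python raises here)
    | some (tq, tr) =>
      let dq := tq - fq
      let dr := tr - fr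
      let ds := -dq - dr
      (dq == 0 || dr == 0 || ds == 0) && (max (max |dq| |dr|) |ds| == |distance|)

-- ===== PRECONDITION & SPEC =====
-- Pre_ excludes exactly the inputs where Python A raises IndexError: a row outside [-5, 4].
def Pre_is_straight_line (from_row : Int) (from_col : Int) (to_row : Int) (to_col : Int) (distance : Int) : Prop :=
  -5 <= from_row ∧ from_row <= 4 ∧ -5 <= to_row ∧ to_row <= 4
instance (from_row : Int) (from_col : Int) (to_row : Int) (to_col : Int) (distance : Int) : Decidable (Pre_is_straight_line from_row from_col to_row to_col distance) := by unfold Pre_is_straight_line; infer_instance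

def pvWitness_is_straight_line : Int × Int × Int × Int × Int := (0, 0, 2, 1, 2)

def Spec_is_straight_line (from_row : Int) (from_col : Int) (to_row : Int) (to_col : Int) (distance : Int) (out : Bool) : Prop := out = is_straight_line_alt from_row from_col to_row to_col distance
instance (from_row : Int) (from_col : Int) (to_row : Int) (to_col : Int) (distance : Int) (out : Bool) : Decidable (Spec_is_straight_line from_row from_col to_row to_col distance out) := by unfold Spec_is_straight_line; infer_instance

-- ===== CLAIM (what is proved, stated in full; the proofs are below) =====
def Claim_equal_is_straight_line : Prop := ∀ (from_row : Int) (from_col : Int) (to_row : Int) (to_col : Int) (distance : Int), Dom_is_straight_line from_row from_col to_row to_col distance → Pre_is_straight_line from_row from_col to_row to_col distance → Spec_is_straight_line from_row from_col to_row to_col distance (is_straight_line from_row from_col to_row to_col distance)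

-- ===== LEMMAS AND PROOFS =====

-- the six-direction scan equals the closed-form test, for any deltas and distance
set_option maxHeartbeats 1600000 in
theorem dirLoop_eq_closed (dq dr distance : Int) :
    dirLoop cubeDirs dq dr distance =
      ((dq == 0 || dr == 0 || (-dq - dr) == 0) && (max (max |dq| |dr|) |(-dq - dr)| == |distance|)) := by
  simp only [cubeDirs, dirLoop]
  rcases abs_cases dq with ⟨h1, h1'⟩ | ⟨h1, h1'⟩ <;>
    rcases abs_cases dr with ⟨h2, h2'⟩ | ⟨h2, h2'⟩ <;>
    rcases abs_cases (-dq - dr) with ⟨h3, h3'⟩ | ⟨h3, h3'⟩ <;>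
    rcases abs_cases distance with ⟨h4, h4'⟩ | ⟨h4, h4'⟩ <;>
    simp only [h1, h2, h3, h4, max_def] <;>
    split_ifs <;> simp <;> omega

theorem is_straight_line_spec : Claim_equal_is_straight_line := by
  intro from_row from_col to_row to_col distance _ hpre
  obtain ⟨hf1, hf2, ht1, ht2⟩ := hpre
  unfold Spec_is_straight_line is_straight_line is_straight_line_alt
  rw [show toCubeB? = toCube? from funext fun r => funext fun c => by
        unfold toCubeB? toCube? rowIndentB rowIndent
        cases PySem.List.pyGet? ([2, 1, 0, 1, 2] : List Int) r <;> rfl]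
  have hf : (toCube? from_row from_col).isSome := by
    unfold toCube? rowIndent
    interval_cases from_row <;> simp [PySem.List.pyGet?, PySem.List.pyIdx?]
  have ht : (toCube? to_row to_col).isSome := by
    unfold toCube? rowIndent
    interval_cases to_row <;> simp [PySem.List.pyGet?, PySem.List.pyIdx?]
  obtain ⟨⟨fq, fr⟩, hfe⟩ := Option.isSome_iff_exists.mp hf
  obtain ⟨⟨tq, tr⟩, hte⟩ := Option.isSome_iff_exists.mp ht
  rw [hfe, hte]
  simp only []
  exact dirLoop_eq_closed _ _ _
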